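-- pv_equiv track=rewrite | github.com/deepmedic/deepmedic | deepmedic/config/utils.py | calc_rec_field_of_path_assuming_strides_1
-- ===== SOURCE A (Python) =====
-- def calc_rec_field_of_path_assuming_strides_1(kern_dims):  # Used by modelParams.py to find default input-shape.
--     # TODO: Remove
--     if not kern_dims:  # list is []
--         return 0
--
--     n_dims = len(kern_dims[0])
--     receptive_field = [1] * n_dims
--     for dim_idx in range(n_dims):
--         for layer_idx in range(len(kern_dims)):
--             receptive_field[dim_idx] += kern_dims[layer_idx][dim_idx] - 1
--     return receptive_field
-- ===== SOURCE B (Python) =====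
-- def calc_rec_field_of_path_assuming_strides_1(kern_dims):
--     if not kern_dims:  # list is []
--         return 0
--
--     n_dims = len(kern_dims[0])
--
--     def go(rows):
--         # receptive field of the suffix of layers, built back-to-front by recursion
--         if not rows:
--             return [1] * n_dims
--         tail = go(rows[1:])
--         return [k + r - 1 for k, r in zip(rows[0], tail)]
--
--     return go(kern_dims)
-- ===== Notes on version B (the rewrite author's own statement) =====
-- stated objective: alternative
-- what changed: Replaces A's in-place accumulation over nested dimension/layer index loops with structural recursion over the layer list, combining each layer elementwise (zip) with the recursively computed receptive field of the remaining layers, built back-to-front.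
-- outside the precondition, e.g. on calc_rec_field_of_path_assuming_strides_1([]): A returns 0, B returns 0; on calc_rec_field_of_path_assuming_strides_1([[3, 3], [5]]): A raises IndexError, B returns [7]
import Mathlib
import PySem

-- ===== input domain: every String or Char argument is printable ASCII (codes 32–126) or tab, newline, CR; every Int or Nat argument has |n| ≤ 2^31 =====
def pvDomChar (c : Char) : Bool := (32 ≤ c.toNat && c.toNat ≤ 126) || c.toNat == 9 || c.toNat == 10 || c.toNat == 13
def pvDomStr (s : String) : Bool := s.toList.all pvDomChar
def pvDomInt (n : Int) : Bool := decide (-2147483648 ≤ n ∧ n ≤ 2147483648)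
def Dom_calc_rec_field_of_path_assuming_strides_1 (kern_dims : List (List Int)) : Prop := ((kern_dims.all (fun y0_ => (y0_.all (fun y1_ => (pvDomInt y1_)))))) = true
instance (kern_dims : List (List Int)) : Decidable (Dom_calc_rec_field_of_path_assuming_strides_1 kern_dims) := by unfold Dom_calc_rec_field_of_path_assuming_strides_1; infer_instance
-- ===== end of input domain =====

-- B replaces A's in-place accumulation over nested dimension/layer index loops with structural
-- recursion over the layer list, combining each layer elementwise (zip) with the recursively
-- computed receptive field of the remaining layers; objective: alternative decomposition.

-- ===== PORT A =====
-- literal port of A's nested loops; kern_dims[layer_idx][dim_idx] via getD (always in range under Pre_)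
def calc_rec_field_of_path_assuming_strides_1 (kern_dims : List (List Int)) : List Int :=
  if kern_dims = [] then []
  else
    let n_dims := (kern_dims.headD []).length
    (List.range n_dims).foldl (fun rf dim_idx =>
      (List.range kern_dims.length).foldl (fun rf2 layer_idx =>
        rf2.set dim_idx (rf2.getD dim_idx 0 + ((kern_dims.getD layer_idx []).getD dim_idx 0 - 1))) rf)
      (List.replicate n_dims 1)

-- ===== PORT B =====
-- Source B's inner `go`: recursion over the layer list, zip-combining each layer with the tail's field
def pvGo (n_dims : Nat) : List (List Int) → List Int
  | [] => List.replicate n_dims 1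
  | r :: rest => ((r.zip (pvGo n_dims rest)).map (fun p => p.1 + p.2 - 1))

def calc_rec_field_of_path_assuming_strides_1_alt (kern_dims : List (List Int)) : List Int :=
  if kern_dims = [] then []
  else pvGo (kern_dims.headD []).length kern_dims

-- ===== PRECONDITION & SPEC =====
-- Pre_ excludes the empty list, where A returns the int 0 (not a value of the declared List Int
-- return type; Python B keeps that guard and also returns 0 there), and ragged inputs having a
-- row shorter than the first row, on which A raises IndexError.
def Pre_calc_rec_field_of_path_assuming_strides_1 (kern_dims : List (List Int)) : Prop :=
  kern_dims ≠ [] ∧ ∀ r ∈ kern_dims, (kern_dims.headD []).length ≤ r.length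
instance (kern_dims : List (List Int)) : Decidable (Pre_calc_rec_field_of_path_assuming_strides_1 kern_dims) := by unfold Pre_calc_rec_field_of_path_assuming_strides_1; infer_instance
def pvWitness_calc_rec_field_of_path_assuming_strides_1 : List (List Int) := [[3, 3], [5, 1], [3, 3]]

def Spec_calc_rec_field_of_path_assuming_strides_1 (kern_dims : List (List Int)) (out : List Int) : Prop := out = calc_rec_field_of_path_assuming_strides_1_alt kern_dims
instance (kern_dims : List (List Int)) (out : List Int) : Decidable (Spec_calc_rec_field_of_path_assuming_strides_1 kern_dims out) := by unfold Spec_calc_rec_field_of_path_assuming_strides_1; infer_instance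

-- ===== CLAIM (what is proved, stated in full; the proofs are below) =====
def Claim_equal_calc_rec_field_of_path_assuming_strides_1 : Prop := ∀ (kern_dims : List (List Int)), Dom_calc_rec_field_of_path_assuming_strides_1 kern_dims → Pre_calc_rec_field_of_path_assuming_strides_1 kern_dims → Spec_calc_rec_field_of_path_assuming_strides_1 kern_dims (calc_rec_field_of_path_assuming_strides_1 kern_dims)

-- ===== LEMMAS AND PROOFS =====

-- bumping one fixed cell once per list element adds the list's sum to that cell
lemma foldl_set_add (xs : List Int) (rf : List Int) (d : Nat) (hd : d < rf.length) :
    xs.foldl (fun rf2 x => rf2.set d (rf2.getD d 0 + x)) rf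
      = rf.set d (rf.getD d 0 + xs.sum) := by
  induction xs generalizing rf with
  | nil => simp [List.getD, List.getElem?_eq_getElem hd, List.set_getElem_self]
  | cons x xs ih =>
      simp only [List.foldl_cons, List.sum_cons]
      rw [ih _ (by simpa using hd)]
      rw [List.set_set]
      congr 1
      rw [List.getD_eq_getElem _ _ (by simpa using hd), List.getElem_set_self,
          List.getD_eq_getElem _ _ hd]
      ring

lemma map_getD_range' (xs : List (List Int)) :
    (List.range xs.length).map (fun l => xs.getD l []) = xs := by
  apply List.ext_getElem <;> simp
  intro i h _
  simp [List.getElem?_eq_getElem h]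

-- per-dimension total contribution of all layers, as A accumulates it
def colS (kd : List (List Int)) (d : Nat) : Int := (kd.map (fun r => r.getD d 0 - 1)).sum

lemma inner_fold (kd : List (List Int)) (rf : List Int) (d : Nat) (hd : d < rf.length) :
    (List.range kd.length).foldl
        (fun rf2 l => rf2.set d (rf2.getD d 0 + ((kd.getD l []).getD d 0 - 1))) rf
      = rf.set d (rf.getD d 0 + colS kd d) := by
  have h := foldl_set_add ((List.range kd.length).map (fun l => (kd.getD l []).getD d 0 - 1)) rf d hd
  rw [List.foldl_map] at h
  rw [h]
  congr 2
  rw [show (fun l => (kd.getD l []).getD d 0 - 1)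
        = ((fun r : List Int => r.getD d 0 - 1) ∘ (fun l => kd.getD l [])) from rfl,
      ← List.map_map, map_getD_range']
  rfl

lemma outer_fold (kd : List (List Int)) (n k : Nat) (hk : k ≤ n) :
    (List.range k).foldl
      (fun rf dim_idx => (List.range kd.length).foldl
        (fun rf2 l => rf2.set dim_idx (rf2.getD dim_idx 0 + ((kd.getD l []).getD dim_idx 0 - 1))) rf)
      (List.replicate n 1)
    = (List.range n).map (fun j => if j < k then 1 + colS kd j else 1) := by
  induction k with
  | zero => simp
  | succ k ih =>
      rw [List.range_succ, List.foldl_append, ih (by omega)]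
      simp only [List.foldl_cons, List.foldl_nil]
      rw [inner_fold kd _ k (by simp; omega)]
      have hget : ((List.range n).map (fun j => if j < k then 1 + colS kd j else 1)).getD k 0
          = 1 := by
        rw [List.getD_eq_getElem _ _ (by simp; omega)]
        simp [List.getElem_map, List.getElem_range]
      rw [hget]
      apply List.ext_getElem
      · simp
      · intro i hi hi2
        rw [List.getElem_set]
        simp only [List.getElem_map, List.getElem_range]
        by_cases hik : k = i
        · subst hik; simp
        · rw [if_neg hik]
          by_cases h3 : i < k
          · rw [if_pos h3, if_pos (by omega)]
          · rw [if_neg h3, if_neg (by omega)]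

-- B's recursion computes the same per-dimension closed form, provided no row is shorter than n
lemma pvGo_eq (n : Nat) (kd : List (List Int)) (hall : ∀ r ∈ kd, n ≤ r.length) :
    pvGo n kd = (List.range n).map (fun j => 1 + colS kd j) := by
  induction kd with
  | nil => simp [pvGo, colS, List.map_const']
  | cons r rest ih =>
      have hr : n ≤ r.length := hall r (by simp)
      rw [pvGo, ih (fun s hs => hall s (by simp [hs]))]
      apply List.ext_getElem
      · simp; omega
      · intro i hi hi2
        simp only [List.getElem_map, List.getElem_zip, List.getElem_range]
        have hin : i < n := by simpa using hi2
        have hir : i < r.length := by omega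
        simp only [colS, List.map_cons, List.sum_cons]
        rw [List.getD_eq_getElem _ _ hir]
        ring

-- ===== VERDICT (by name: the statement is the Claim_ definition above) =====
theorem calc_rec_field_of_path_assuming_strides_1_spec : Claim_equal_calc_rec_field_of_path_assuming_strides_1 := by
  intro kd _ hpre
  obtain ⟨h0, hall⟩ := hpre
  unfold Spec_calc_rec_field_of_path_assuming_strides_1
  unfold calc_rec_field_of_path_assuming_strides_1 calc_rec_field_of_path_assuming_strides_1_alt
  rw [if_neg h0, if_neg h0]
  rw [pvGo_eq _ kd hall, outer_fold kd _ _ (le_refl _)]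
  apply List.map_congr_left
  intro j hj
  rw [List.mem_range] at hj
  rw [if_pos hj]
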